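-- pv_equiv track=rewrite | github.com/djbazza/Visual_Nav_Aid | AtomMatrix/main.py | dispMatrix
-- ===== SOURCE A (Python) =====
-- def dispMatrix(i, j):
--     DispMatrix = [0, 0, 0, 0, 0, 0, 0, 0, 0, 0, 0, 0, 0, 0, 0, 0, 0, 0, 0, 0, 0, 0, 0, 0, 0]
--     for x in range(5):
--         for y in range(5):
--             if x == i:
--                 DispMatrix[x*5+y] = 1
--             elif y == j:
--                 DispMatrix[x*5+y] = 1
--             else:
--                 DispMatrix[x*5+y] = 0
--     return DispMatrix
-- ===== SOURCE B (Python) =====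
-- def dispMatrix(i, j):
--     M = [0] * 25
--     for x in range(5):
--         if x == i:
--             for y in range(5):
--                 M[x*5+y] = 1
--     for y in range(5):
--         if y == j:
--             for x in range(5):
--                 M[x*5+y] = 1
--     return M
-- ===== Notes on version B (the rewrite author's own statement) =====
-- stated objective: simpler
-- what changed: Replaces the 25 per-cell nested tests with a zero-initialized list plus two independent sweeps: one pass marks row i, a second independent pass marks column j.
import Mathlib
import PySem

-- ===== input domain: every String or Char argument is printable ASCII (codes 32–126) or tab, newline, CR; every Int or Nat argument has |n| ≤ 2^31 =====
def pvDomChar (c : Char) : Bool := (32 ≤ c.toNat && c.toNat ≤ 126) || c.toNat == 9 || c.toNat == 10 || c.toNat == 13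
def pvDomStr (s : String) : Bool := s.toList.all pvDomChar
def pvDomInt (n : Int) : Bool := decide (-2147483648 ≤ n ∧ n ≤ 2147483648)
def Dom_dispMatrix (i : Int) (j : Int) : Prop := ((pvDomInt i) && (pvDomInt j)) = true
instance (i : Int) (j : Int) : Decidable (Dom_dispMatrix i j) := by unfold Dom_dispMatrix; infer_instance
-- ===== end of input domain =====

-- B replaces A's single nested per-cell three-way test with a zero-initialized
-- list plus two independent sweeps (mark row i, then mark column j): simpler decomposition.

-- ===== PORT A =====
-- for x in range(5): for y in range(5): if x == i: M[x*5+y]=1 elif y == j: M[x*5+y]=1 else: M[x*5+y]=0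
def dispMatrix (i : Int) (j : Int) : List Int :=
  (PySem.List.pyRange 0 5 1).foldl (fun M x =>
    (PySem.List.pyRange 0 5 1).foldl (fun M y =>
      if x = i then M.set (x * 5 + y).toNat 1
      else if y = j then M.set (x * 5 + y).toNat 1
      else M.set (x * 5 + y).toNat 0) M)
    [0, 0, 0, 0, 0, 0, 0, 0, 0, 0, 0, 0, 0, 0, 0, 0, 0, 0, 0, 0, 0, 0, 0, 0, 0]

-- ===== PORT B =====
-- M = [0]*25; sweep 1 marks row i; sweep 2 marks column j
def dispMatrix_alt (i : Int) (j : Int) : List Int :=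
  let M0 := List.replicate 25 (0 : Int)
  let M1 := (PySem.List.pyRange 0 5 1).foldl (fun M x =>
    if x = i then
      (PySem.List.pyRange 0 5 1).foldl (fun M y => M.set (x * 5 + y).toNat 1) M
    else M) M0
  (PySem.List.pyRange 0 5 1).foldl (fun M y =>
    if y = j then
      (PySem.List.pyRange 0 5 1).foldl (fun M x => M.set (x * 5 + y).toNat 1) M
    else M) M1

-- ===== PRECONDITION & SPEC =====
def Spec_dispMatrix (i : Int) (j : Int) (out : List Int) : Prop := out = dispMatrix_alt i j
instance (i : Int) (j : Int) (out : List Int) : Decidable (Spec_dispMatrix i j out) := by unfold Spec_dispMatrix; infer_instance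

-- ===== CLAIM (what is proved, stated in full; the proofs are below) =====
def Claim_equal_dispMatrix : Prop := ∀ (i : Int) (j : Int), Dom_dispMatrix i j → Spec_dispMatrix i j (dispMatrix i j)

-- ===== LEMMAS AND PROOFS =====
theorem dispMatrix_eq_alt (i j : Int) : dispMatrix i j = dispMatrix_alt i j := by
  have hi : (0:Int) = i ∨ (1:Int) = i ∨ (2:Int) = i ∨ (3:Int) = i ∨ (4:Int) = i ∨
      ((0:Int) ≠ i ∧ (1:Int) ≠ i ∧ (2:Int) ≠ i ∧ (3:Int) ≠ i ∧ (4:Int) ≠ i) := by omega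
  have hj : (0:Int) = j ∨ (1:Int) = j ∨ (2:Int) = j ∨ (3:Int) = j ∨ (4:Int) = j ∨
      ((0:Int) ≠ j ∧ (1:Int) ≠ j ∧ (2:Int) ≠ j ∧ (3:Int) ≠ j ∧ (4:Int) ≠ j) := by omega
  have hr : PySem.List.pyRange 0 5 1 = [0, 1, 2, 3, 4] := by decide
  rcases hi with h | h | h | h | h | ⟨a0, a1, a2, a3, a4⟩ <;>
    rcases hj with g | g | g | g | g | ⟨b0, b1, b2, b3, b4⟩ <;>
    (try subst h) <;> (try subst g) <;>
    simp [dispMatrix, dispMatrix_alt, List.replicate, *]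

-- ===== VERDICT (by name: the statement is the Claim_ definition above) =====
theorem dispMatrix_spec : Claim_equal_dispMatrix := by
  intro i j _
  exact dispMatrix_eq_alt i j
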